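-- pv_equiv track=rewrite | github.com/emiwltz/pisicine_python | 03/ex5/ft_data_stream.py | generate_event
-- ===== SOURCE A (Python) =====
-- from typing import Generator
--
-- def generate_event(
--     event_count: int,
-- ) -> Generator[tuple[str, int, str], None, None]:
--     players = ("alice", "bob", "charlie")
--     actions = (
--         "killed monster",
--         "found treasure",
--         "leveled up",
--         "helped a friend",
--     )
--     levels = (5, 12, 8, 15, 3, 10, 7)
--
--     for index in range(event_count):
--         yield (
--             players[index % len(players)],
--             levels[index % len(levels)],
--             actions[index % len(actions)],
--         )
-- ===== SOURCE B (Python) =====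
-- def generate_event(event_count):
--     players = ("alice", "bob", "charlie")
--     actions = (
--         "killed monster",
--         "found treasure",
--         "leveled up",
--         "helped a friend",
--     )
--     levels = (5, 12, 8, 15, 3, 10, 7)
--
--     # three cyclic queues advanced in lockstep: refill when exhausted, pop the head
--     p_q, l_q, a_q = [], [], []
--     for _ in range(event_count):
--         if not p_q:
--             p_q = list(players)
--         if not l_q:
--             l_q = list(levels)
--         if not a_q:
--             a_q = list(actions)
--         yield (p_q.pop(0), l_q.pop(0), a_q.pop(0))
-- ===== Notes on version B (the rewrite author's own statement) =====
-- stated objective: alternative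
-- what changed: Replaces per-index modular arithmetic (index % len on each of the three tuples) with three cyclic queues that are refilled when exhausted and popped in lockstep, so no index or mod is computed.
import Mathlib
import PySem

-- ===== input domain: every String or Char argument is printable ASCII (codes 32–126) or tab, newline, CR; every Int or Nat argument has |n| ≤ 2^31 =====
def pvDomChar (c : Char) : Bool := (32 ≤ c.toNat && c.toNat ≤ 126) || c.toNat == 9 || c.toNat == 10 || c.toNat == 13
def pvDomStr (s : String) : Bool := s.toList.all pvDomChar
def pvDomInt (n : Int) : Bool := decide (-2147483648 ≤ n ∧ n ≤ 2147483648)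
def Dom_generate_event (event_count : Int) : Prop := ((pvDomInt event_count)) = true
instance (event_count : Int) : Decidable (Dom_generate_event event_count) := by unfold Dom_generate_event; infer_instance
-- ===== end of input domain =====

-- B replaces A's per-index modular arithmetic with three cyclic queues popped in lockstep (alternative structure, same cost).

-- ===== PORT A =====
def generate_event (event_count : Int) : List (String × Int × String) :=
  let players : List String := ["alice", "bob", "charlie"]
  let actions : List String := ["killed monster", "found treasure", "leveled up", "helped a friend"]
  let levels : List Int := [5, 12, 8, 15, 3, 10, 7]
  (PySem.List.pyRange 0 event_count 1).map (fun index =>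
    (PySem.List.pyGetD players (PySem.Int.mod index 3) "",
     PySem.List.pyGetD levels (PySem.Int.mod index 7) 0,
     PySem.List.pyGetD actions (PySem.Int.mod index 4) ""))

-- ===== PORT B =====
def pvPlayers : List String := ["alice", "bob", "charlie"]
def pvActions : List String := ["killed monster", "found treasure", "leveled up", "helped a friend"]
def pvLevels : List Int := [5, 12, 8, 15, 3, 10, 7]

-- the loop of Source B: three queues, refilled when empty, heads popped in lockstep
def pvLoop : Nat → List String → List Int → List String → List (String × Int × String)
  | 0, _, _, _ => []
  | Nat.succ n, qp, ql, qa =>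
    match (if qp.isEmpty then pvPlayers else qp),
          (if ql.isEmpty then pvLevels else ql),
          (if qa.isEmpty then pvActions else qa) with
    | p :: qp', l :: ql', a :: qa' => (p, l, a) :: pvLoop n qp' ql' qa'
    | _, _, _ => []

def generate_event_alt (event_count : Int) : List (String × Int × String) :=
  pvLoop event_count.toNat [] [] []

-- ===== PRECONDITION & SPEC =====
def Spec_generate_event (event_count : Int) (out : List (String × Int × String)) : Prop := out = generate_event_alt event_count
instance (event_count : Int) (out : List (String × Int × String)) : Decidable (Spec_generate_event event_count out) := by unfold Spec_generate_event; infer_instance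

-- ===== CLAIM (what is proved, stated in full; the proofs are below) =====
def Claim_equal_generate_event : Prop := ∀ (event_count : Int), Dom_generate_event event_count → Spec_generate_event event_count (generate_event event_count)

-- ===== LEMMAS AND PROOFS =====

-- one cyclic queue in isolation (proof device: pvLoop is the lockstep zip of three of these)
def pvCycle {α : Type} (orig : List α) : Nat → List α → List α
  | 0, _ => []
  | Nat.succ n, q =>
    match (if q.isEmpty then orig else q) with
    | [] => []
    | y :: ys => y :: pvCycle orig n ys

theorem pvLoop_eq_zip : ∀ (n : Nat) (qp : List String) (ql : List Int) (qa : List String),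
    pvLoop n qp ql qa =
      (pvCycle pvPlayers n qp).zip ((pvCycle pvLevels n ql).zip (pvCycle pvActions n qa)) := by
  intro n
  induction n with
  | zero => intro qp ql qa; rfl
  | succ n ih =>
    intro qp ql qa
    have hp : (if qp.isEmpty then pvPlayers else qp) ≠ [] := by
      cases qp <;> simp [pvPlayers]
    have hl : (if ql.isEmpty then pvLevels else ql) ≠ [] := by
      cases ql <;> simp [pvLevels]
    have ha : (if qa.isEmpty then pvActions else qa) ≠ [] := by
      cases qa <;> simp [pvActions]
    obtain ⟨p, qp', hpe⟩ := List.exists_cons_of_ne_nil hp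
    obtain ⟨l, ql', hle⟩ := List.exists_cons_of_ne_nil hl
    obtain ⟨a, qa', hae⟩ := List.exists_cons_of_ne_nil ha
    rw [pvLoop, pvCycle, pvCycle, pvCycle, hpe, hle, hae]
    simp [List.zip, ih]

theorem pvCycle_eq {α : Type} (orig : List α) (d : α) (horig : orig ≠ []) :
    ∀ (n j : Nat), j ≤ orig.length →
      pvCycle orig n (orig.drop j) =
        (List.range n).map (fun i => orig.getD ((j + i) % orig.length) d) := by
  intro n
  induction n with
  | zero => intro j _; rfl
  | succ n ih =>
    intro j hj
    have hL : 0 < orig.length := List.length_pos_of_ne_nil horig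
    -- the refilled queue is orig.drop j' with j' < orig.length
    set j' : Nat := if j = orig.length then 0 else j with hj'def
    have hj' : j' < orig.length := by
      by_cases h : j = orig.length <;> simp [hj'def, h] <;> omega
    have hmodeq : j % orig.length = j' % orig.length := by
      by_cases h : j = orig.length <;> simp [hj'def, h, Nat.mod_self]
    have hrefill : (if (orig.drop j).isEmpty then orig else orig.drop j) = orig.drop j' := by
      by_cases h : j = orig.length
      · simp [h, hj'def]
      · have : j < orig.length := by omega
        simp [hj'def, h, List.isEmpty_iff, List.drop_eq_nil_iff]
        omega
    rw [pvCycle, hrefill, List.drop_eq_getElem_cons hj']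
    show orig[j'] :: pvCycle orig n (orig.drop (j' + 1)) = _
    rw [ih (j' + 1) (by omega)]
    rw [List.range_succ_eq_map, List.map_cons, List.map_map]
    congr 1
    · have : (j + 0) % orig.length = j' := by
        rw [Nat.add_zero, hmodeq, Nat.mod_eq_of_lt hj']
      rw [this, List.getD_eq_getElem _ _ hj']
    · apply List.map_congr_left
      intro i _
      simp only [Function.comp]
      rw [Nat.add_mod j, hmodeq, ← Nat.add_mod]
      have h2 : j' + 1 + i = j' + i.succ := by omega
      rw [h2]

theorem generate_event_spec : Claim_equal_generate_event := by
  intro ec _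
  unfold Spec_generate_event generate_event generate_event_alt
  have cP : pvCycle pvPlayers ec.toNat [] =
      (List.range ec.toNat).map (fun i => pvPlayers.getD ((pvPlayers.length + i) % pvPlayers.length) "") := by
    rw [show ([] : List String) = pvPlayers.drop pvPlayers.length from by simp]
    exact pvCycle_eq pvPlayers "" (by simp [pvPlayers]) ec.toNat pvPlayers.length le_rfl
  have cL : pvCycle pvLevels ec.toNat [] =
      (List.range ec.toNat).map (fun i => pvLevels.getD ((pvLevels.length + i) % pvLevels.length) 0) := by
    rw [show ([] : List Int) = pvLevels.drop pvLevels.length from by simp]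
    exact pvCycle_eq pvLevels 0 (by simp [pvLevels]) ec.toNat pvLevels.length le_rfl
  have cA : pvCycle pvActions ec.toNat [] =
      (List.range ec.toNat).map (fun i => pvActions.getD ((pvActions.length + i) % pvActions.length) "") := by
    rw [show ([] : List String) = pvActions.drop pvActions.length from by simp]
    exact pvCycle_eq pvActions "" (by simp [pvActions]) ec.toNat pvActions.length le_rfl
  rw [pvLoop_eq_zip, cP, cL, cA, List.zip_map', List.zip_map']
  show (PySem.List.pyRange 0 ec 1).map (fun index =>
      (PySem.List.pyGetD ["alice", "bob", "charlie"] (PySem.Int.mod index 3) "",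
       PySem.List.pyGetD [5, 12, 8, 15, 3, 10, 7] (PySem.Int.mod index 7) 0,
       PySem.List.pyGetD ["killed monster", "found treasure", "leveled up", "helped a friend"]
         (PySem.Int.mod index 4) "")) = _
  rw [PySem.List.pyRange_one, List.map_map]
  simp only [Int.sub_zero]
  apply List.map_congr_left
  intro k hk
  simp only [Function.comp, Int.zero_add]
  have hm3 : PySem.Int.mod (k : Int) 3 = ((k % 3 : Nat) : Int) := by
    rw [PySem.Int.mod_eq_emod_of_pos (by omega)]; push_cast; rfl
  have hm7 : PySem.Int.mod (k : Int) 7 = ((k % 7 : Nat) : Int) := by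
    rw [PySem.Int.mod_eq_emod_of_pos (by omega)]; push_cast; rfl
  have hm4 : PySem.Int.mod (k : Int) 4 = ((k % 4 : Nat) : Int) := by
    rw [PySem.Int.mod_eq_emod_of_pos (by omega)]; push_cast; rfl
  rw [hm3, hm7, hm4]
  simp only [PySem.List.pyGetD_natCast]
  simp [pvPlayers, pvLevels, pvActions, Nat.add_mod_left]
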